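-- pv_equiv track=rewrite | github.com/JackSuuu/Python_notes | python-programs/guess_song_title.py | predict_song_title
-- ===== SOURCE A (Python) =====
-- def predict_song_title(lyrics):
--     lyric_count = {}
--
--     # Count the occurrences of each lyric
--     for lyric in lyrics:
--         lyric_count[lyric] = lyric_count.get(lyric, 0) + 1
--
--     max_occurrences = 0
--     most_repeated_lyric = ""
--
--     # Find the lyric repeated the most times
--     for lyric, count in lyric_count.items():
--         if count > max_occurrences:
--             max_occurrences = count
--             most_repeated_lyric = lyric
--         elif count == max_occurrences and len(lyric) < len(most_repeated_lyric):
--             most_repeated_lyric = lyric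
--
--     return most_repeated_lyric
-- ===== SOURCE B (Python) =====
-- def predict_song_title(lyrics):
--     lyric_count = {}
--     for lyric in lyrics:
--         lyric_count[lyric] = lyric_count.get(lyric, 0) + 1
--     items = sorted(lyric_count.items(), key=lambda kv: (-kv[1], len(kv[0])))
--     return items[0][0] if items else ""
-- ===== Notes on version B (the rewrite author's own statement) =====
-- stated objective: alternative
-- what changed: The running max-count/shortest-tie scan over the count dict is replaced by a stable sort of the items on the key (-count, len(lyric)) followed by taking the first element (with an explicit empty guard).
import Mathlib
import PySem

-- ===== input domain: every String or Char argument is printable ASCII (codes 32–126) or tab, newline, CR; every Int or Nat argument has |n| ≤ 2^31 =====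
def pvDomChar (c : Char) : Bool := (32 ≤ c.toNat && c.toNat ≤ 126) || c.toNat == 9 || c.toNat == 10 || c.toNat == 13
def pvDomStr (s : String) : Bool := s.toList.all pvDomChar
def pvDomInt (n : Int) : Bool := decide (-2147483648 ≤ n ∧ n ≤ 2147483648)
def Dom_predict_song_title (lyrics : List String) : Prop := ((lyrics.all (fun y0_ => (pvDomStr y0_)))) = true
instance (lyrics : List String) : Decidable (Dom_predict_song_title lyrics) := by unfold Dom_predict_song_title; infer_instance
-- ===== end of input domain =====

-- B replaces A's running max-count/shortest-tie scan by a stable sort on (-count, len) and takes the first item ("" when empty); same results, alternative algorithm.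

-- ===== PORT A =====
def predict_song_title (lyrics : List String) : String :=
  let lyric_count := lyrics.foldl (fun d lyric => d.insert lyric (d.getD lyric 0 + 1)) (PySem.Dict.empty : PySem.Dict String Int)
  let st := lyric_count.items.foldl (fun (st : Int × String) kv =>
      if kv.2 > st.1 then (kv.2, kv.1)
      else if kv.2 = st.1 ∧ PySem.Str.len kv.1 < PySem.Str.len st.2 then (st.1, kv.1)
      else st) ((0 : Int), "")
  st.2

-- ===== PORT B =====
def predict_song_title_alt (lyrics : List String) : String :=
  let lyric_count := lyrics.foldl (fun d lyric => d.insert lyric (d.getD lyric 0 + 1)) (PySem.Dict.empty : PySem.Dict String Int)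
  let items := PySem.List.sorted2 lyric_count.items (fun kv => -kv.2) (fun kv => PySem.Str.len kv.1)
  match items with
  | [] => ""
  | kv :: _ => kv.1

-- ===== PRECONDITION & SPEC =====
def Spec_predict_song_title (lyrics : List String) (out : String) : Prop := out = predict_song_title_alt lyrics
instance (lyrics : List String) (out : String) : Decidable (Spec_predict_song_title lyrics out) := by unfold Spec_predict_song_title; infer_instance

-- ===== CLAIM (what is proved, stated in full; the proofs are below) =====
def Claim_equal_predict_song_title : Prop := ∀ (lyrics : List String), Dom_predict_song_title lyrics → Spec_predict_song_title lyrics (predict_song_title lyrics)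

-- ===== LEMMAS AND PROOFS =====

-- the strict lexicographic "goes before" test sorted2 uses for B's key (-count, len)
def pvLt (a b : String × Int) : Bool :=
  decide (-a.2 < -b.2) || (!decide (-b.2 < -a.2) && decide (PySem.Str.len a.1 < PySem.Str.len b.1))

-- A's scan step
def pvStep (st : Int × String) (kv : String × Int) : Int × String :=
  if kv.2 > st.1 then (kv.2, kv.1)
  else if kv.2 = st.1 ∧ PySem.Str.len kv.1 < PySem.Str.len st.2 then (st.1, kv.1)
  else st

-- running-best fold (the head of the insertion sort)
def pvBest (l : List (String × Int)) (h : String × Int) : String × Int :=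
  l.foldl (fun b x => if pvLt x b then x else b) h

lemma pvStep_swap (h x : String × Int) :
    pvStep (h.2, h.1) x = ((if pvLt x h then x else h).2, (if pvLt x h then x else h).1) := by
  unfold pvStep pvLt
  simp only [PySem.Str.len_eq, gt_iff_lt, Bool.or_eq_true, Bool.and_eq_true, Bool.not_eq_true',
    decide_eq_true_eq, decide_eq_false_iff_not]
  split_ifs <;> simp_all [Prod.ext_iff] <;> omega

lemma pvScan_eq_best (l : List (String × Int)) (h : String × Int) :
    l.foldl pvStep (h.2, h.1) = ((pvBest l h).2, (pvBest l h).1) := by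
  induction l generalizing h with
  | nil => rfl
  | cons x t ih =>
    simp only [List.foldl_cons, pvStep_swap]
    unfold pvBest
    simp only [List.foldl_cons]
    exact ih _

lemma pvInsert_shape (l : List (String × Int)) (h : String × Int) (t : List (String × Int)) :
    ∃ t', l.foldl (fun acc x => PySem.List.insertBy pvLt x acc) (h :: t) = pvBest l h :: t' := by
  induction l generalizing h t with
  | nil => exact ⟨t, rfl⟩
  | cons x l ih =>
    simp only [List.foldl_cons]
    unfold pvBest
    simp only [List.foldl_cons]
    cases hx : pvLt x h with
    | true =>
      rw [show PySem.List.insertBy pvLt x (h :: t) = x :: h :: t by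
        simp [PySem.List.insertBy, hx]]
      simpa [pvBest, hx] using ih x (h :: t)
    | false =>
      rw [show PySem.List.insertBy pvLt x (h :: t) = h :: PySem.List.insertBy pvLt x t by
        simp [PySem.List.insertBy, hx]]
      simpa [pvBest, hx] using ih h (PySem.List.insertBy pvLt x t)

-- on any items list with positive counts, A's scan result is the head of B's insertion sort
lemma pvKey (its : List (String × Int)) (hpos : ∀ kv ∈ its, (0 : Int) < kv.2) :
    (its.foldl pvStep ((0 : Int), "")).2 =
      (match its.foldl (fun acc x => PySem.List.insertBy pvLt x acc) [] with
        | [] => ""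
        | kv :: _ => kv.1) := by
  cases its with
  | nil => rfl
  | cons i rest =>
    have hp : (0 : Int) < i.2 := hpos i List.mem_cons_self
    have hfirst : pvStep ((0 : Int), "") i = (i.2, i.1) := by
      unfold pvStep; simp [hp]
    obtain ⟨t', ht'⟩ := pvInsert_shape rest i []
    simp only [List.foldl_cons, hfirst]
    rw [show PySem.List.insertBy pvLt i [] = [i] from rfl, ht', pvScan_eq_best]

-- counts in the counter's items are positive
lemma pvItems_pos (lyrics : List String) (kv : String × Int)
    (hm : kv ∈ (lyrics.foldl (fun d lyric => d.insert lyric (d.getD lyric 0 + 1)) (PySem.Dict.empty : PySem.Dict String Int)).items) :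
    (0 : Int) < kv.2 := by
  rw [PySem.Dict.foldl_insert_getD_add_one_eq_counter] at hm
  rw [PySem.Dict.items_counter] at hm
  simp only [List.mem_map] at hm
  obtain ⟨k, hk, hkv⟩ := hm
  have hk' : k ∈ lyrics := (PySem.Set.mem_ofList lyrics k).1 hk
  have : 0 < lyrics.count k := List.count_pos_iff.2 hk'
  subst hkv
  simpa using this

-- ===== VERDICT (by name: the statement is the Claim_ definition above) =====
theorem predict_song_title_spec : Claim_equal_predict_song_title := by
  intro lyrics _
  unfold Spec_predict_song_title
  have h := pvKey ((lyrics.foldl (fun d lyric => d.insert lyric (d.getD lyric 0 + 1)) (PySem.Dict.empty : PySem.Dict String Int)).items) (pvItems_pos lyrics)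
  exact h
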